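-- pv_equiv track=rewrite | github.com/shriram7057/GFG-POTD-Mastery | Max Xor Subarray of size K.py | maxSubarrayXOR
-- ===== SOURCE A (Python) =====
-- def maxSubarrayXOR(arr, k):
--     # code here
--     n = len(arr)
--     curr_xor = 0
--     for i in range(k):
--         curr_xor ^= arr[i]
--     max_xor = curr_xor
--
--     for i in range(k,n):
--         curr_xor ^= arr[i-k]
--         curr_xor ^= arr[i]
--         if curr_xor > max_xor:
--             max_xor = curr_xor
--     return max_xor
-- ===== SOURCE B (Python) =====
-- def maxSubarrayXOR(arr, k):
--     # Prefix-XOR table: prefix[i] = XOR of arr[:i]; each window XOR is a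
--     # difference of two table entries instead of an incrementally slid value.
--     prefix = [0]
--     for x in arr:
--         prefix.append(prefix[-1] ^ x)
--     max_xor = prefix[k] ^ prefix[0]
--     for i in range(k + 1, len(arr) + 1):
--         w = prefix[i] ^ prefix[i - k]
--         if w > max_xor:
--             max_xor = w
--     return max_xor
-- ===== Notes on version B (the rewrite author's own statement) =====
-- stated objective: alternative
-- what changed: Replaces A's incrementally slid window XOR with a precomputed prefix-XOR table, each window XOR becoming prefix[i]^prefix[i-k] in a scan over window end positions.
import Mathlib
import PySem

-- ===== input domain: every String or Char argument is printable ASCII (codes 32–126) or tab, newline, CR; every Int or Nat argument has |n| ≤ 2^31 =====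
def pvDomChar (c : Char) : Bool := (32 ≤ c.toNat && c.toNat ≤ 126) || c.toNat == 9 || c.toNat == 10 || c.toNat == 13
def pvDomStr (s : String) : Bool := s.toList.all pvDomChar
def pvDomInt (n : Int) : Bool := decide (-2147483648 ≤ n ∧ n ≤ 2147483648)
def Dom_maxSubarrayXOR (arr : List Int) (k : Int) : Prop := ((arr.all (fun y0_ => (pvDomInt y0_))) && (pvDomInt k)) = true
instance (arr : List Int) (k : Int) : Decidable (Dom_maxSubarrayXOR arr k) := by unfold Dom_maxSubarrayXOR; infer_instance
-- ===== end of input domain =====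

-- B replaces A's incrementally slid window XOR by a prefix-XOR table with each
-- window XOR read off as prefix[i] ^ prefix[i-k]; same cost, different decomposition.

-- ===== PORT A =====
def maxSubarrayXOR (arr : List Int) (k : Int) : Int :=
  let n : Int := arr.length
  -- for i in range(k): curr_xor ^= arr[i]         (indices valid under Pre_)
  let curr_xor : Int := (PySem.List.pyRange 0 k 1).foldl
    (fun c i => PySem.Int.bxor c (PySem.List.pyGetD arr i 0)) 0
  -- for i in range(k, n): curr_xor ^= arr[i-k]; curr_xor ^= arr[i]; if curr_xor > max_xor: …
  ((PySem.List.pyRange k n 1).foldl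
    (fun (s : Int × Int) i =>
      let c := PySem.Int.bxor (PySem.Int.bxor s.1 (PySem.List.pyGetD arr (i - k) 0))
                 (PySem.List.pyGetD arr i 0)
      (c, if c > s.2 then c else s.2))
    (curr_xor, curr_xor)).2

-- ===== PORT B =====
def maxSubarrayXOR_alt (arr : List Int) (k : Int) : Int :=
  -- prefix = [0]; for x in arr: prefix.append(prefix[-1] ^ x)
  let prefixL : List Int := arr.foldl
    (fun p x => p ++ [PySem.Int.bxor (PySem.List.pyGetD p (-1) 0) x]) [(0 : Int)]
  -- max_xor = prefix[k] ^ prefix[0]               (prefix[k] valid under Pre_)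
  let max0 : Int := PySem.Int.bxor (PySem.List.pyGetD prefixL k 0)
                      (PySem.List.pyGetD prefixL 0 0)
  -- for i in range(k+1, len(arr)+1): w = prefix[i] ^ prefix[i-k]; if w > max_xor: …
  (PySem.List.pyRange (k + 1) ((arr.length : Int) + 1) 1).foldl
    (fun m i =>
      let w := PySem.Int.bxor (PySem.List.pyGetD prefixL i 0)
                 (PySem.List.pyGetD prefixL (i - k) 0)
      if w > m then w else m) max0

-- ===== PRECONDITION & SPEC =====
-- Pre_: exactly the inputs where Python A returns (0 ≤ k ≤ len(arr)); for k < 0 or k > len(arr)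
-- A raises IndexError (arr[i] in one of its loops goes out of range).
def Pre_maxSubarrayXOR (arr : List Int) (k : Int) : Prop := 0 ≤ k ∧ k ≤ (arr.length : Int)
instance (arr : List Int) (k : Int) : Decidable (Pre_maxSubarrayXOR arr k) := by
  unfold Pre_maxSubarrayXOR; infer_instance
def pvWitness_maxSubarrayXOR : List Int × Int := ([1, 2, 3], 2)

def Spec_maxSubarrayXOR (arr : List Int) (k : Int) (out : Int) : Prop := out = maxSubarrayXOR_alt arr k
instance (arr : List Int) (k : Int) (out : Int) : Decidable (Spec_maxSubarrayXOR arr k out) := by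
  unfold Spec_maxSubarrayXOR; infer_instance

-- ===== CLAIM (what is proved, stated in full; the proofs are below) =====
def Claim_equal_maxSubarrayXOR : Prop := ∀ (arr : List Int) (k : Int), Dom_maxSubarrayXOR arr k → Pre_maxSubarrayXOR arr k → Spec_maxSubarrayXOR arr k (maxSubarrayXOR arr k)

-- ===== LEMMAS AND PROOFS =====

-- XOR of the first j elements (prefix XOR)
def pxor (arr : List Int) (j : Nat) : Int := (arr.take j).foldl PySem.Int.bxor 0

-- running prefix-XOR tail: tailScan a [x1,x2,…] = [a^x1, a^x1^x2, …]
def tailScan (a : Int) : List Int → List Int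
  | [] => []
  | x :: xs => PySem.Int.bxor a x :: tailScan (PySem.Int.bxor a x) xs

-- sign/magnitude encoding used only to prove associativity of bxor
def pvEnc (s : Bool) (m : Nat) : Int := if s then -(m : Int) - 1 else (m : Int)

theorem bxor_enc (s1 s2 : Bool) (m1 m2 : Nat) :
    PySem.Int.bxor (pvEnc s1 m1) (pvEnc s2 m2) = pvEnc (s1.xor s2) (m1 ^^^ m2) := by
  cases s1 <;> cases s2 <;>
    simp [pvEnc, PySem.Int.bxor] <;>
    intros <;> (try split_ifs) <;> omega

theorem enc_repr (a : Int) :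
    a = pvEnc (decide (a < 0)) (if a < 0 then (-a - 1).toNat else a.toNat) := by
  by_cases h : a < 0 <;> simp [pvEnc, h] <;> omega

theorem bxor_assoc (a b c : Int) :
    PySem.Int.bxor (PySem.Int.bxor a b) c = PySem.Int.bxor a (PySem.Int.bxor b c) := by
  obtain ⟨s1, m1, rfl⟩ : ∃ s m, a = pvEnc s m := ⟨_, _, enc_repr a⟩
  obtain ⟨s2, m2, rfl⟩ : ∃ s m, b = pvEnc s m := ⟨_, _, enc_repr b⟩
  obtain ⟨s3, m3, rfl⟩ : ∃ s m, c = pvEnc s m := ⟨_, _, enc_repr c⟩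
  simp only [bxor_enc, Bool.xor_assoc, Nat.xor_assoc]

theorem bxor_zero_left (a : Int) : PySem.Int.bxor 0 a = a := by
  rw [PySem.Int.bxor_comm]; exact PySem.Int.bxor_zero a

theorem xor4 (P p Q q : Int) :
    PySem.Int.bxor (PySem.Int.bxor (PySem.Int.bxor P Q) q) p
      = PySem.Int.bxor (PySem.Int.bxor P p) (PySem.Int.bxor Q q) := by
  rw [bxor_assoc P Q q, bxor_assoc, PySem.Int.bxor_comm (PySem.Int.bxor Q q) p,
    ← bxor_assoc]

theorem pxor_zero (arr : List Int) : pxor arr 0 = 0 := rfl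

theorem pxor_succ (arr : List Int) (j : Nat) (hj : j < arr.length) :
    pxor arr (j + 1) = PySem.Int.bxor (pxor arr j) (arr.getD j 0) := by
  unfold pxor
  rw [List.take_add_one, List.getElem?_eq_getElem hj]
  rw [Option.toList_some, List.foldl_append]
  simp only [List.foldl_cons, List.foldl_nil]
  simp [hj]

theorem foldl_bxor_shift (l : List Int) : ∀ a : Int,
    l.foldl PySem.Int.bxor a = PySem.Int.bxor a (l.foldl PySem.Int.bxor 0) := by
  induction l with
  | nil => intro a; simp [PySem.Int.bxor_zero]
  | cons x xs ih =>
    intro a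
    simp only [List.foldl_cons]
    rw [ih, ih (PySem.Int.bxor 0 x), bxor_zero_left, bxor_assoc]

theorem pxor_cons (x : Int) (xs : List Int) (j : Nat) :
    pxor (x :: xs) (j + 1) = PySem.Int.bxor x (pxor xs j) := by
  unfold pxor
  rw [List.take_succ_cons]
  simp only [List.foldl_cons]
  rw [bxor_zero_left, foldl_bxor_shift]

theorem tailScan_get (l : List Int) : ∀ (a : Int) (j : Nat), j < l.length →
    (tailScan a l).getD j 0 = PySem.Int.bxor a (pxor l (j + 1)) := by
  induction l with
  | nil => intro a j h; simp at h
  | cons x xs ih =>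
    intro a j h
    cases j with
    | zero => simp [tailScan, pxor_cons, pxor_zero, PySem.Int.bxor_zero]
    | succ j =>
      simp only [tailScan, List.getD_cons_succ]
      rw [ih _ j (by simpa using h), pxor_cons, bxor_assoc]

theorem prefixGet (arr : List Int) (j : Nat) (hj : j ≤ arr.length) :
    PySem.List.pyGetD ((0 : Int) :: tailScan 0 arr) (j : Int) 0 = pxor arr j := by
  cases j with
  | zero => simp [PySem.List.pyGetD_zero_cons, pxor_zero]
  | succ j =>
    rw [PySem.List.pyGetD_natCast]
    simp only [List.getD_cons_succ]
    rw [tailScan_get arr 0 j (by omega), bxor_zero_left]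

theorem build_eq (l : List Int) : ∀ (acc : List Int) (a : Int) (hne : acc ≠ []),
    acc.getLast hne = a →
    l.foldl (fun p x => p ++ [PySem.Int.bxor (PySem.List.pyGetD p (-1) 0) x]) acc
      = acc ++ tailScan a l := by
  induction l with
  | nil => intro acc a hne hlast; simp [tailScan]
  | cons x xs ih =>
    intro acc a hne hlast
    simp only [List.foldl_cons, tailScan]
    have hg : PySem.List.pyGetD acc (-1) (0 : Int) = a := by
      simp [pysem, hne, hlast]
    rw [hg]
    rw [ih (acc ++ [PySem.Int.bxor a x]) (PySem.Int.bxor a x) (by simp)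
      (by simp)]
    simp

theorem loop1 (arr : List Int) (m : Nat) (hm : m ≤ arr.length) :
    (PySem.List.pyRange 0 (m : Int) 1).foldl
      (fun c i => PySem.Int.bxor c (PySem.List.pyGetD arr i 0)) 0 = pxor arr m := by
  induction m with
  | zero => simp [PySem.List.pyRange_one_eq_nil (le_refl (0:Int)), pxor_zero]
  | succ m ih =>
    rw [show ((m + 1 : Nat) : Int) = (m : Int) + 1 from by push_cast; ring]
    rw [PySem.List.pyRange_one_succ_right (by exact_mod_cast Nat.zero_le m)]
    rw [List.foldl_append]
    simp only [List.foldl_cons, List.foldl_nil]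
    rw [ih (by omega), PySem.List.pyGetD_natCast, ← pxor_succ arr m (by omega)]

theorem spine (arr : List Int) (kn : Nat) :
    ∀ (c j : Nat) (mx : Int), kn ≤ j → j + c ≤ arr.length →
    ((PySem.List.pyRange (j : Int) ((j + c : Nat) : Int) 1).foldl
        (fun (s : Int × Int) i =>
          let cc := PySem.Int.bxor
            (PySem.Int.bxor s.1 (PySem.List.pyGetD arr (i - (kn : Int)) 0))
            (PySem.List.pyGetD arr i 0)
          (cc, if cc > s.2 then cc else s.2))
        (PySem.Int.bxor (pxor arr j) (pxor arr (j - kn)), mx)).2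
      = (PySem.List.pyRange ((j : Int) + 1) (((j + c : Nat) : Int) + 1) 1).foldl
          (fun m i =>
            let w := PySem.Int.bxor
              (PySem.List.pyGetD ((0 : Int) :: tailScan 0 arr) i 0)
              (PySem.List.pyGetD ((0 : Int) :: tailScan 0 arr) (i - (kn : Int)) 0)
            if w > m then w else m) mx := by
  intro c
  induction c with
  | zero =>
    intro j mx hkj hle
    rw [PySem.List.pyRange_one_eq_nil (by simp), PySem.List.pyRange_one_eq_nil (by simp)]
    simp
  | succ c ih =>
    intro j mx hkj hle
    have hjn : j < arr.length := by omega
    have hjkn : j - kn < arr.length := by omega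
    have hidx : ((j : Int) - (kn : Int)) = ((j - kn : Nat) : Int) := by omega
    have hcast1 : (j : Int) + 1 = ((j + 1 : Nat) : Int) := by push_cast; ring
    have hsub1 : j + 1 - kn = (j - kn) + 1 := by omega
    have hstep : PySem.Int.bxor (PySem.Int.bxor
        (PySem.Int.bxor (pxor arr j) (pxor arr (j - kn)))
        (PySem.List.pyGetD arr ((j : Int) - (kn : Int)) 0)) (PySem.List.pyGetD arr (j : Int) 0)
        = PySem.Int.bxor (pxor arr (j + 1)) (pxor arr (j + 1 - kn)) := by
      rw [hidx, PySem.List.pyGetD_natCast, PySem.List.pyGetD_natCast, xor4,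
        ← pxor_succ arr j hjn, ← pxor_succ arr (j - kn) hjkn, hsub1]
    rw [PySem.List.pyRange_one_cons (show (j : Int) < ((j + (c+1) : Nat) : Int) from by push_cast; omega)]
    rw [PySem.List.pyRange_one_cons (show (j : Int) + 1 < ((j + (c+1) : Nat) : Int) + 1 from by push_cast; omega)]
    simp only [List.foldl_cons]
    rw [show ((j + (c + 1) : Nat) : Int) = (((j + 1) + c : Nat) : Int) from by push_cast; ring]
    rw [hstep, hcast1, prefixGet arr (j + 1) (by omega),
      show ((j + 1 : Nat) : Int) - (kn : Int) = ((j + 1 - kn : Nat) : Int) from by omega,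
      prefixGet arr (j + 1 - kn) (by omega)]
    exact ih (j + 1) _ (by omega) (by omega)

-- ===== VERDICT (by name: the statement is the Claim_ definition above) =====
theorem maxSubarrayXOR_spec : Claim_equal_maxSubarrayXOR := by
  intro arr k _hdom hpre
  obtain ⟨hk0, hklen'⟩ := hpre
  simp only [Spec_maxSubarrayXOR, maxSubarrayXOR, maxSubarrayXOR_alt]
  have hk : ((k.toNat : Nat) : Int) = k := Int.toNat_of_nonneg hk0
  set kn := k.toNat with hdefkn
  have hklen : kn ≤ arr.length := by omega
  rw [← hk]
  have hbuild : arr.foldl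
      (fun p x => p ++ [PySem.Int.bxor (PySem.List.pyGetD p (-1) 0) x]) [(0:Int)]
      = (0:Int) :: tailScan 0 arr := by
    rw [build_eq arr [0] 0 (by simp) (by simp)]; simp
  rw [hbuild, loop1 arr kn hklen, PySem.List.pyGetD_zero_cons, prefixGet arr kn hklen,
    PySem.Int.bxor_zero]
  have hlen : ((arr.length : Nat) : Int) = ((kn + (arr.length - kn) : Nat) : Int) := by omega
  rw [hlen]
  have hinit : pxor arr kn = PySem.Int.bxor (pxor arr kn) (pxor arr (kn - kn)) := by
    rw [Nat.sub_self, pxor_zero, PySem.Int.bxor_zero]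
  nth_rewrite 1 [hinit]
  exact spine arr kn (arr.length - kn) kn (pxor arr kn) (le_refl kn) (by omega)
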